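-- pv_equiv track=rewrite | github.com/kajyuuen/funer | funer/converters/sequence_label_to_sequence_label.py | bio2bilou
-- ===== SOURCE A (Python) =====
-- from typing import List, Optional
--
-- def is_same_entity(label: Optional[str], next_label: Optional[str]):
--     if label in ["O", None]:
--         return False
--     if next_label in ["O", None]:
--         return False
--
--     prefix, entity_type = label.split("-")  # type: ignore
--     next_prefix, next_entity_type = next_label.split("-")  # type: ignore
--     if entity_type != next_entity_type:
--         return False
--
--     if prefix == "B":
--         if next_prefix == "B":
--             return False
--         else:
--             return True
--     else:
--         if next_prefix == "B":
--             return False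
--         else:
--             return True
--
-- def bio2bilou(bio_labels: List[str]) -> List[str]:
--     length = len(bio_labels)
--     bilou_labels = ["O"] * length
--
--     for i in range(length):
--         currnet_label = bio_labels[i]
--         if i == 0:
--             prev_label = None
--         else:
--             prev_label = bio_labels[i - 1]
--         if i == (length - 1):
--             next_label = None
--         else:
--             next_label = bio_labels[i + 1]
--
--         # currnet_label is non entity
--         if currnet_label == "O":
--             continue
--
--         # currnet_label is entity
--         if is_same_entity(prev_label, currnet_label):
--             if is_same_entity(currnet_label, next_label):
--                 bilou_labels[i] = f"I-{currnet_label[2:]}"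
--             else:
--                 bilou_labels[i] = f"L-{currnet_label[2:]}"
--         else:
--             if is_same_entity(currnet_label, next_label):
--                 bilou_labels[i] = f"B-{currnet_label[2:]}"
--             else:
--                 bilou_labels[i] = f"U-{currnet_label[2:]}"
--     return bilou_labels
-- ===== SOURCE B (Python) =====
-- from typing import List, Optional
--
-- def is_same_entity(label: Optional[str], next_label: Optional[str]):
--     if label in ["O", None]:
--         return False
--     if next_label in ["O", None]:
--         return False
--
--     prefix, entity_type = label.split("-")  # type: ignore
--     next_prefix, next_entity_type = next_label.split("-")  # type: ignore
--     if entity_type != next_entity_type: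
--         return False
--
--     if prefix == "B":
--         if next_prefix == "B":
--             return False
--         else:
--             return True
--     else:
--         if next_prefix == "B":
--             return False
--         else:
--             return True
--
-- def bio2bilou(bio_labels: List[str]) -> List[str]:
--     # Segmentation algorithm: scan maximal entity runs (consecutive labels chained by
--     # is_same_entity) and emit a whole BILOU span per run: singleton -> U, longer run ->
--     # B, I..., L.  Correct because is_same_entity is a property of each adjacent pair,
--     # so per-position prev/next checks coincide with run boundaries.
--     out: List[str] = []
--     i, n = 0, len(bio_labels)
--     while i < n:
--         if bio_labels[i] == "O":
--             out.append("O")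
--             i += 1
--             continue
--         j = i
--         while j + 1 < n and is_same_entity(bio_labels[j], bio_labels[j + 1]):
--             j += 1
--         if j == i:
--             out.append("U-" + bio_labels[i][2:])
--         else:
--             out.append("B-" + bio_labels[i][2:])
--             for k in range(i + 1, j):
--                 out.append("I-" + bio_labels[k][2:])
--             out.append("L-" + bio_labels[j][2:])
--         i = j + 1
--     return out
-- ===== Notes on version B (the rewrite author's own statement) =====
-- stated objective: alternative
-- what changed: B is a segmentation algorithm: it scans maximal entity runs chained by is_same_entity and emits a whole BILOU span per run (U for a singleton, B/I.../L otherwise), instead of A's per-position classification from prev/next checks.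
import Mathlib
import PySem

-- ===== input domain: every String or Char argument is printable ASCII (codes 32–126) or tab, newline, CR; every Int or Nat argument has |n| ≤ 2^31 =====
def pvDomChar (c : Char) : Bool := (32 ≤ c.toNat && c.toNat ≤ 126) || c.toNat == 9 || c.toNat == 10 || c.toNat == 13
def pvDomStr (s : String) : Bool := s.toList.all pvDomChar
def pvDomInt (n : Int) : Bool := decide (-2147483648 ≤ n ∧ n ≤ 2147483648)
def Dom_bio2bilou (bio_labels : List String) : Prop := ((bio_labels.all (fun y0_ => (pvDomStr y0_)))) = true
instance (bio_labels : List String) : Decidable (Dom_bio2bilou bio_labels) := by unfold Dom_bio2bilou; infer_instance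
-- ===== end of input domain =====

-- B replaces A's per-position prev/next classification by a run segmentation: it scans maximal
-- entity runs chained by is_same_entity and emits a whole BILOU span (U, or B/I…/L) per run.

-- ===== PORT A =====
-- shared helper of Source A and Source B (Source B reuses it verbatim); split("-") unpacking is exact when its
-- argument contains exactly one '-', which Pre_ guarantees whenever this code reaches the split.
def isSameEntity (label next_label : Option String) : Bool :=
  if label == some "O" || label == none then false
  else if next_label == some "O" || next_label == none then false
  else
    let l := label.getD ""
    let nl := next_label.getD ""
    let lparts := (PySem.Str.split? l "-").getD []
    let nparts := (PySem.Str.split? nl "-").getD []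
    let prefix_ := lparts.getD 0 ""
    let entity_type := lparts.getD 1 ""
    let next_prefix := nparts.getD 0 ""
    let next_entity_type := nparts.getD 1 ""
    if entity_type != next_entity_type then false
    else if prefix_ == "B" then
      (if next_prefix == "B" then false else true)
    else
      (if next_prefix == "B" then false else true)

def bio2bilou (bio_labels : List String) : List String :=
  let length : Int := bio_labels.length
  let bilou_labels := List.replicate bio_labels.length "O"
  (PySem.List.pyRange 0 length 1).foldl (fun bl i =>
    -- indices produced by range(length) are exactly 0 ≤ i < len, so pyGetD is exact here
    let currnet_label := PySem.List.pyGetD bio_labels i ""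
    let prev_label : Option String :=
      if i == 0 then none else some (PySem.List.pyGetD bio_labels (i - 1) "")
    let next_label : Option String :=
      if i == length - 1 then none else some (PySem.List.pyGetD bio_labels (i + 1) "")
    if currnet_label == "O" then bl
    else if isSameEntity prev_label (some currnet_label) then
      if isSameEntity (some currnet_label) next_label then
        bl.set i.toNat ("I-" ++ PySem.Str.slice currnet_label (some 2) none)
      else
        bl.set i.toNat ("L-" ++ PySem.Str.slice currnet_label (some 2) none)
    else
      if isSameEntity (some currnet_label) next_label then
        bl.set i.toNat ("B-" ++ PySem.Str.slice currnet_label (some 2) none)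
      else
        bl.set i.toNat ("U-" ++ PySem.Str.slice currnet_label (some 2) none)) bilou_labels

-- ===== PORT B =====
-- Source B's inner 'while j + 1 < n and is_same_entity(...)' loop; all indices it reads are in range,
-- so List.getD is exact for the Python indexing.
def runEnd (bio : List String) (j : Nat) : Nat :=
  if _h : j + 1 < bio.length then
    if isSameEntity (some (bio.getD j "")) (some (bio.getD (j + 1) "")) then
      runEnd bio (j + 1)
    else j
  else j
termination_by bio.length - j

-- needed so the outer while loop ('i = j + 1') terminates
lemma runEnd_ge (bio : List String) (j : Nat) : j ≤ runEnd bio j := by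
  unfold runEnd
  split
  · split
    · exact le_trans (Nat.le_succ j) (runEnd_ge bio (j + 1))
    · exact le_refl j
  · exact le_refl j
termination_by bio.length - j

-- Source B's outer while loop over run starts: one BILOU span is appended per run
def emitFrom (bio : List String) (i : Nat) : List String :=
  if _hi : i < bio.length then
    if bio.getD i "" == "O" then "O" :: emitFrom bio (i + 1)
    else
      let j := runEnd bio i
      if j == i then
        ("U-" ++ PySem.Str.slice (bio.getD i "") (some 2) none) :: emitFrom bio (i + 1)
      else
        ("B-" ++ PySem.Str.slice (bio.getD i "") (some 2) none) ::
          ((List.range' (i + 1) (j - (i + 1))).map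
              (fun k => "I-" ++ PySem.Str.slice (bio.getD k "") (some 2) none) ++
            ("L-" ++ PySem.Str.slice (bio.getD j "") (some 2) none) :: emitFrom bio (j + 1))
  else []
termination_by bio.length - i
decreasing_by
  · omega
  · omega
  · have := runEnd_ge bio i; omega

def bio2bilou_alt (bio_labels : List String) : List String :=
  emitFrom bio_labels 0

-- ===== PRECONDITION & SPEC =====
-- Pre_ excludes exactly the inputs where the Python raises ValueError: an adjacent pair of
-- non-"O" labels one of which does not contain exactly one '-' (split("-") unpacking fails).
def Pre_bio2bilou (bio_labels : List String) : Prop :=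
  ∀ p ∈ bio_labels.zip bio_labels.tail, p.1 ≠ "O" → p.2 ≠ "O" →
    (PySem.Str.count p.1 "-" = 1 ∧ PySem.Str.count p.2 "-" = 1)
instance (bio_labels : List String) : Decidable (Pre_bio2bilou bio_labels) := by
  unfold Pre_bio2bilou; infer_instance
def pvWitness_bio2bilou : List String := ["B-PER", "I-PER", "O", "B-LOC"]

def Spec_bio2bilou (bio_labels : List String) (out : List String) : Prop := out = bio2bilou_alt bio_labels
instance (bio_labels : List String) (out : List String) : Decidable (Spec_bio2bilou bio_labels out) := by unfold Spec_bio2bilou; infer_instance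

-- ===== CLAIM (what is proved, stated in full; the proofs are below) =====
def Claim_equal_bio2bilou : Prop := ∀ (bio_labels : List String), Dom_bio2bilou bio_labels → Pre_bio2bilou bio_labels → Spec_bio2bilou bio_labels (bio2bilou bio_labels)

-- ===== LEMMAS AND PROOFS =====

-- the guard of A's loop body at index k, and the string A writes at an entity position k
def pvCA (bio : List String) (k : Nat) : Bool :=
  !(PySem.List.pyGetD bio (k : Int) "" == "O")

def pvVA (bio : List String) (k : Nat) : String :=
  let n : Int := bio.length
  let cur := PySem.List.pyGetD bio (k : Int) ""
  let prev : Option String :=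
    if (k : Int) == 0 then none else some (PySem.List.pyGetD bio ((k : Int) - 1) "")
  let next : Option String :=
    if (k : Int) == n - 1 then none else some (PySem.List.pyGetD bio ((k : Int) + 1) "")
  let tail := PySem.Str.slice cur (some 2) none
  if isSameEntity prev (some cur) then
    if isSameEntity (some cur) next then "I-" ++ tail else "L-" ++ tail
  else
    if isSameEntity (some cur) next then "B-" ++ tail else "U-" ++ tail

-- adjacency of positions k and k+1, and the per-position tag both programs produce
def pvLinkN (bio : List String) (k : Nat) : Bool :=
  isSameEntity (some (bio.getD k "")) (some (bio.getD (k + 1) ""))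

def pvCell (bio : List String) (k : Nat) : String :=
  let lab := bio.getD k ""
  if lab == "O" then "O"
  else
    let left := decide (0 < k) && pvLinkN bio (k - 1)
    let right := decide (k + 1 < bio.length) && pvLinkN bio k
    let tail := PySem.Str.slice lab (some 2) none
    if left && right then "I-" ++ tail
    else if left then "L-" ++ tail
    else if right then "B-" ++ tail
    else "U-" ++ tail

lemma foldl_set_spec (c : Nat → Bool) (v : Nat → String) :
    ∀ (l : List Nat) (L : List String) (j : Nat),
      (l.foldl (fun bl i => if c i then bl.set i (v i) else bl) L)[j]? =
        if j ∈ l ∧ c j = true then (if j < L.length then some (v j) else none) else L[j]? := by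
  intro l
  induction l with
  | nil => intro L j; simp
  | cons i l ih =>
    intro L j
    simp only [List.foldl_cons]
    rw [ih]
    have hlen : (if c i then L.set i (v i) else L).length = L.length := by split <;> simp
    by_cases hmem : j ∈ l ∧ c j = true
    · rw [if_pos hmem, hlen,
        if_pos (show j ∈ i :: l ∧ c j = true from ⟨List.mem_cons_of_mem _ hmem.1, hmem.2⟩)]
    · rw [if_neg hmem]
      by_cases hij : j = i ∧ c j = true
      · obtain ⟨rfl, hcj⟩ := hij
        have hL : (if c j = true then L.set j (v j) else L) = L.set j (v j) := if_pos hcj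
        rw [hL, List.getElem?_set, if_pos (rfl : j = j),
          if_pos (show j ∈ j :: l ∧ c j = true from ⟨List.mem_cons_self, hcj⟩)]
      · have hL' : (if c i then L.set i (v i) else L)[j]? = L[j]? := by
          split
          · next hci =>
            rw [List.getElem?_set, if_neg (fun h : i = j => hij ⟨h.symm, h ▸ hci⟩)]
          · rfl
        rw [hL', if_neg (fun h => (List.mem_cons.mp h.1).elim
          (fun e => hij ⟨e, h.2⟩) (fun m => hmem ⟨m, h.2⟩))]

lemma bio2bilou_getElem? (bio : List String) (j : Nat) :
    (bio2bilou bio)[j]? =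
      if j < bio.length then some (if pvCA bio j then pvVA bio j else "O") else none := by
  simp only [bio2bilou]
  rw [PySem.List.pyRange_one]
  simp only [sub_zero, Int.toNat_natCast, List.foldl_map]
  rw [List.foldl_ext _ (fun bl k => if pvCA bio k then bl.set k (pvVA bio k) else bl) _
    (by
      intro bl k _
      simp only [zero_add, Int.toNat_natCast]
      by_cases hO : (PySem.List.pyGetD bio (k : Int) "" == "O") = true
      · rw [if_pos hO, if_neg (show ¬pvCA bio k = true by simp only [pvCA, hO]; decide)]
      · have hO' : (PySem.List.pyGetD bio (k : Int) "" == "O") = false := eq_false_of_ne_true hO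
        rw [if_neg hO, if_pos (show pvCA bio k = true by simp only [pvCA, hO']; decide)]
        simp only [pvVA]
        split_ifs <;> rfl)]
  rw [foldl_set_spec]
  by_cases hj : j < bio.length
  · by_cases hc : pvCA bio j = true <;>
      simp [hj, hc]
  · simp [hj]

lemma isSameEntity_none_left (x : Option String) : isSameEntity none x = false := by
  simp [isSameEntity]

lemma isSameEntity_none_right (x : Option String) : isSameEntity x none = false := by
  unfold isSameEntity
  split_ifs <;> simp_all

lemma isSameEntity_O_left (x : Option String) : isSameEntity (some "O") x = false := by
  simp [isSameEntity]

lemma isSameEntity_O_right (x : Option String) : isSameEntity x (some "O") = false := by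
  unfold isSameEntity
  split_ifs <;> simp_all

-- reduce pvCell at an "O" position and at an entity position with given link bits
lemma pvCell_O (bio : List String) (i : Nat) (h : bio.getD i "" = "O") :
    pvCell bio i = "O" := by
  simp only [pvCell, h]
  simp

lemma pvCell_tag (bio : List String) (i : Nat) (hO : (bio.getD i "" == "O") = false)
    (l r : Bool) (hl : (decide (0 < i) && pvLinkN bio (i - 1)) = l)
    (hr : (decide (i + 1 < bio.length) && pvLinkN bio i) = r) :
    pvCell bio i =
      (if l && r then "I-" else if l then "L-" else if r then "B-" else "U-") ++
        PySem.Str.slice (bio.getD i "") (some 2) none := by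
  simp only [pvCell, hO, hl, hr]
  cases l <;> cases r <;> simp

-- A's per-position value coincides with pvCell
lemma cellA_eq (bio : List String) (j : Nat) (hj : j < bio.length) :
    (if pvCA bio j then pvVA bio j else "O") = pvCell bio j := by
  have hget : ∀ k : Nat, PySem.List.pyGetD bio (k : Int) "" = bio.getD k "" := fun k => by
    rw [PySem.List.pyGetD_natCast]
  by_cases hO : (bio.getD j "" == "O") = true
  · rw [if_neg (by simp only [pvCA, hget, hO]; simp), pvCell_O bio j (eq_of_beq hO)]
  · have hO' : (bio.getD j "" == "O") = false := eq_false_of_ne_true hO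
    rw [if_pos (by simp only [pvCA, hget, hO']; simp), pvCell_tag bio j hO' _ _ rfl rfl]
    have hleft :
        isSameEntity (if (j : Int) == 0 then none
            else some (PySem.List.pyGetD bio ((j : Int) - 1) "")) (some (bio.getD j "")) =
          (decide (0 < j) && pvLinkN bio (j - 1)) := by
      by_cases h0 : j = 0
      · subst h0; simp [isSameEntity_none_left]
      · have hb : ((j : Int) == 0) = false := by simp; omega
        have hcast : (j : Int) - 1 = ((j - 1 : Nat) : Int) := by omega
        rw [hb, if_neg (by simp), hcast, hget]
        have h2 : j - 1 + 1 = j := by omega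
        simp [pvLinkN, h2, show 0 < j by omega]
    have hright :
        isSameEntity (some (bio.getD j ""))
            (if (j : Int) == (bio.length : Int) - 1 then none
             else some (PySem.List.pyGetD bio ((j : Int) + 1) "")) =
          (decide (j + 1 < bio.length) && pvLinkN bio j) := by
      by_cases hlast : j = bio.length - 1
      · have hb : ((j : Int) == (bio.length : Int) - 1) = true := by simp; omega
        rw [hb, if_pos (by simp), isSameEntity_none_right]
        simp [show ¬(j + 1 < bio.length) by omega]
      · have hb : ((j : Int) == (bio.length : Int) - 1) = false := by simp; omega
        have hcast : (j : Int) + 1 = ((j + 1 : Nat) : Int) := by omega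
        rw [hb, if_neg (by simp), hcast, hget]
        simp [pvLinkN, show j + 1 < bio.length by omega]
    simp only [pvVA, hget, hleft, hright]
    cases hp : (decide (0 < j) && pvLinkN bio (j - 1)) <;>
      cases hq : (decide (j + 1 < bio.length) && pvLinkN bio j) <;> simp

lemma bio2bilou_eq_map (bio : List String) :
    bio2bilou bio = (List.range bio.length).map (pvCell bio) := by
  apply List.ext_getElem?
  intro j
  rw [bio2bilou_getElem?, List.getElem?_map]
  by_cases hj : j < bio.length
  · rw [if_pos hj, List.getElem?_range hj, cellA_eq bio j hj]
    rfl
  · rw [if_neg hj, List.getElem?_eq_none (by simpa using hj)]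
    rfl

-- properties of the inner while loop
lemma runEnd_lt (bio : List String) (j : Nat) (h : j < bio.length) :
    runEnd bio j < bio.length := by
  unfold runEnd
  split
  · split
    · exact runEnd_lt bio (j + 1) (by omega)
    · exact h
  · exact h
termination_by bio.length - j

lemma runEnd_link (bio : List String) (j : Nat) :
    ∀ k, j ≤ k → k < runEnd bio j → pvLinkN bio k = true := by
  intro k hk hk2
  unfold runEnd at hk2
  split at hk2
  · split at hk2
    · next hlink =>
      rcases Nat.eq_or_lt_of_le hk with rfl | hlt
      · exact hlink
      · exact runEnd_link bio (j + 1) k hlt hk2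
    · omega
  · omega
termination_by bio.length - j

lemma runEnd_stop (bio : List String) (j : Nat) :
    ¬(runEnd bio j + 1 < bio.length ∧ pvLinkN bio (runEnd bio j) = true) := by
  unfold runEnd
  split
  · split
    · exact runEnd_stop bio (j + 1)
    · next hlink => exact fun hc => hlink (by simpa [pvLinkN] using hc.2)
  · next h => exact fun hc => h hc.1
termination_by bio.length - j

-- labels linked from the left are non-"O"
lemma link_right_ne_O (bio : List String) (k : Nat) (h : pvLinkN bio k = true) :
    (bio.getD (k + 1) "" == "O") = false := by
  by_contra hO
  have h1 : bio.getD (k + 1) "" = "O" := by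
    cases hO' : (bio.getD (k + 1) "" == "O") with
    | true => exact eq_of_beq hO'
    | false => exact absurd hO' (by simp_all)
  rw [pvLinkN, h1, isSameEntity_O_right] at h
  exact absurd h (by simp)

-- B's output from position i is the per-position tags of the remaining suffix, provided
-- nothing links into position i from the left
lemma emitFrom_eq_map (bio : List String) :
    ∀ (fuel i : Nat), bio.length - i ≤ fuel →
      (i = 0 ∨ pvLinkN bio (i - 1) = false ∨ bio.length ≤ i) →
      emitFrom bio i = (List.range' i (bio.length - i)).map (pvCell bio) := by
  intro fuel
  induction fuel with
  | zero =>
    intro i hf _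
    rw [emitFrom, dif_neg (by omega), show bio.length - i = 0 by omega]
    rfl
  | succ fuel ih =>
    intro i hf hinv
    by_cases hi : i < bio.length
    · have hleft0 : (decide (0 < i) && pvLinkN bio (i - 1)) = false := by
        rcases hinv with rfl | hl | hlen
        · simp
        · simp [hl]
        · omega
      have hrange : bio.length - i = (bio.length - (i + 1)) + 1 := by omega
      rw [emitFrom, dif_pos hi]
      by_cases hO : (bio.getD i "" == "O") = true
      · rw [if_pos hO, ih (i + 1) (by omega) (Or.inr (Or.inl (by
          simp only [Nat.add_sub_cancel, pvLinkN, eq_of_beq hO, isSameEntity_O_left])))]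
        rw [hrange, List.range'_succ, List.map_cons, pvCell_O bio i (eq_of_beq hO)]
      · have hO' : (bio.getD i "" == "O") = false := eq_false_of_ne_true hO
        rw [if_neg hO]
        have hlink : ∀ k, i ≤ k → k < runEnd bio i → pvLinkN bio k = true :=
          runEnd_link bio i
        have hge := runEnd_ge bio i
        have hjlt := runEnd_lt bio i hi
        have hstop := runEnd_stop bio i
        set j := runEnd bio i with hj
        have hinv' : j + 1 = 0 ∨ pvLinkN bio (j + 1 - 1) = false ∨ bio.length ≤ j + 1 := by
          by_cases hc : j + 1 < bio.length
          · refine Or.inr (Or.inl ?_)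
            simp only [Nat.add_sub_cancel]
            by_cases hl : pvLinkN bio j = true
            · exact absurd ⟨hc, hl⟩ hstop
            · simpa using hl
          · exact Or.inr (Or.inr (by omega))
        by_cases hji : j = i
        · -- singleton run: U tag
          rw [hji] at hstop
          rw [if_pos (by simp [hji]), ih (i + 1) (by omega) (hji ▸ hinv'),
            hrange, List.range'_succ, List.map_cons]
          have hrightb : (decide (i + 1 < bio.length) && pvLinkN bio i) = false := by
            by_cases hc : i + 1 < bio.length
            · by_cases hl : pvLinkN bio i = true
              · exact absurd ⟨hc, hl⟩ hstop
              · simp [hc, eq_false_of_ne_true hl]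
            · simp [hc]
          congr 1
          rw [pvCell_tag bio i hO' false false hleft0 hrightb]
          simp
        · -- run of length ≥ 2: B, I…, L
          have hji' : i < j := lt_of_le_of_ne hge (Ne.symm hji)
          rw [if_neg (by simp [hji]), ih (j + 1) (by omega) hinv']
          have hsplit : List.range' i (bio.length - i) =
              i :: (List.range' (i + 1) (j - (i + 1)) ++
                j :: List.range' (j + 1) (bio.length - (j + 1))) := by
            have h1 : bio.length - i = (j + 1 - i) + (bio.length - (j + 1)) := by omega
            rw [h1, ← List.range'_append_1]
            have h2 : j + 1 - i = (j - (i + 1)) + 1 + 1 := by omega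
            rw [h2, List.range'_succ, List.range'_1_concat]
            have h4 : i + 1 + (j - (i + 1)) = j := by omega
            have h5 : i + (j - (i + 1) + 1 + 1) = j + 1 := by omega
            rw [h4, h5]
            simp
          rw [hsplit]
          simp only [List.map_cons, List.map_append]
          congr 1
          · -- head: B tag
            have hrightb : (decide (i + 1 < bio.length) && pvLinkN bio i) = true := by
              simp [show i + 1 < bio.length by omega, hlink i le_rfl hji']
            rw [pvCell_tag bio i hO' false true hleft0 hrightb]
            simp
          congr 1
          · -- middle: I tags
            apply List.map_congr_left
            intro k hk
            have hk1 : i + 1 ≤ k := (List.mem_range'_1.mp hk).1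
            have hk2 : k < j := by
              have := (List.mem_range'_1.mp hk).2; omega
            have hlab : (bio.getD k "" == "O") = false := by
              have h4 : k - 1 + 1 = k := by omega
              exact h4 ▸ link_right_ne_O bio (k - 1)
                (hlink (k - 1) (by omega) (by omega))
            have hleftk : (decide (0 < k) && pvLinkN bio (k - 1)) = true := by
              simp [show 0 < k by omega, hlink (k - 1) (by omega) (by omega)]
            have hrightk : (decide (k + 1 < bio.length) && pvLinkN bio k) = true := by
              simp [show k + 1 < bio.length by omega, hlink k (by omega) hk2]
            rw [pvCell_tag bio k hlab true true hleftk hrightk]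
            simp
          · -- end: L tag, then the already-handled rest
            congr 1
            have hlab : (bio.getD j "" == "O") = false := by
              have h4 : j - 1 + 1 = j := by omega
              exact h4 ▸ link_right_ne_O bio (j - 1)
                (hlink (j - 1) (by omega) (by omega))
            have hleftj : (decide (0 < j) && pvLinkN bio (j - 1)) = true := by
              simp [show 0 < j by omega, hlink (j - 1) (by omega) (by omega)]
            have hrightj : (decide (j + 1 < bio.length) && pvLinkN bio j) = false := by
              by_cases hc : j + 1 < bio.length
              · by_cases hl : pvLinkN bio j = true
                · exact absurd ⟨hc, hl⟩ hstop
                · simp [hc, eq_false_of_ne_true hl]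
              · simp [hc]
            rw [pvCell_tag bio j hlab true false hleftj hrightj]
            simp
    · rw [emitFrom, dif_neg hi, show bio.length - i = 0 by omega]
      rfl

-- ===== VERDICT (by name: the statement is the Claim_ definition above) =====
theorem bio2bilou_spec : Claim_equal_bio2bilou := by
  intro bio _ _
  unfold Spec_bio2bilou bio2bilou_alt
  rw [bio2bilou_eq_map,
    emitFrom_eq_map bio bio.length 0 (by omega) (Or.inl rfl),
    Nat.sub_zero, List.range_eq_range']
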